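-- pv_equiv track=rewrite | github.com/ZethWang/MAD-RL | gen_adaptive.py | clean_repeat_suffix
-- ===== SOURCE A (Python) =====
-- def clean_repeat_suffix(text: str) -> str:
--     """清理重复的后缀"""
--     n = len(text)
--     for length in range(n//2, 10, -1):
--         suffix = text[-length:]
--         pos = text.find(suffix)
--         if pos != -1 and pos + length != n:
--             return text[:pos + length]
--     return text
-- ===== SOURCE B (Python) =====
-- def clean_repeat_suffix(text: str) -> str:
--     """清理重复的后缀 — one backward-extension pass instead of one find() per candidate length"""
--     n = len(text)
--     # e[j] = length of the longest common suffix of text[:j+1] and text, for each j < n-1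
--     e = []
--     for j in range(n - 1):
--         k = 0
--         while k <= j and text[j - k] == text[n - 1 - k]:
--             k += 1
--         e.append(k)
--     L = min(max(e, default=0), n // 2)
--     if L <= 10:
--         return text
--     j0 = next(j for j in range(n - 1) if e[j] >= L)
--     return text[:j0 + 1]
-- ===== Notes on version B (the rewrite author's own statement) =====
-- stated objective: faster
-- what changed: Instead of scanning candidate suffix lengths from n//2 downward and calling text.find on each candidate suffix, B makes one pass computing for every earlier ending position the longest common suffix with the whole text, caps the maximum at n//2, and takes the earliest ending position achieving it.
import Mathlib
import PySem

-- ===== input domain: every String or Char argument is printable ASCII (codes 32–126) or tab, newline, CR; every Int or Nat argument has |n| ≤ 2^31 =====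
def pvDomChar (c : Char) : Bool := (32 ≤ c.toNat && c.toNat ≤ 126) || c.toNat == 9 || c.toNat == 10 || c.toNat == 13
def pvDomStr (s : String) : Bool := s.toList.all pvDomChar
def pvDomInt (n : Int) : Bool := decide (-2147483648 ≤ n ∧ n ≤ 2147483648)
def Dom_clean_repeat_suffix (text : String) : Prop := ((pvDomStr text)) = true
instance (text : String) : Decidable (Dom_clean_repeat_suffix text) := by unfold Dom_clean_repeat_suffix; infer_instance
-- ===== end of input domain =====

-- B replaces A's descending scan over candidate lengths (a find() per candidate) by one pass of
-- backward common-suffix extensions over the ending positions; objective: faster.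

-- ===== PORT A =====
-- the 'for length in range(n//2, 10, -1)' loop with its early return
def pvALoop (text : String) (n : Int) : List Int → String
  | [] => text
  | length :: rest =>
      let suffix := PySem.Str.slice text (some (-length)) none
      let pos := PySem.Str.find text suffix
      if pos ≠ -1 ∧ pos + length ≠ n then PySem.Str.slice text none (some (pos + length))
      else pvALoop text n rest

def clean_repeat_suffix (text : String) : String :=
  let n : Int := PySem.Str.len text
  pvALoop text n (PySem.List.pyRange (PySem.Int.floordiv n 2) 10 (-1))

-- ===== PORT B =====
-- the 'while k <= j and text[j-k] == text[n-1-k]: k += 1' loop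
def pvExt (t : List Char) (n j k : Nat) : Nat :=
  if k ≤ j ∧ t.getD (j - k) ' ' = t.getD (n - 1 - k) ' ' then pvExt t n j (k + 1) else k
termination_by j + 1 - k
decreasing_by omega

def clean_repeat_suffix_alt (text : String) : String :=
  let t := text.toList
  let n := t.length
  let e := (List.range (n - 1)).map (fun j => pvExt t n j 0)
  let L := min (e.foldl max 0) (n / 2)
  if L ≤ 10 then text
  else PySem.Str.slice text none (some ((e.findIdx (fun x => decide (L ≤ x)) : Int) + 1))

-- ===== PRECONDITION & SPEC =====
def Spec_clean_repeat_suffix (text : String) (out : String) : Prop := out = clean_repeat_suffix_alt text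
instance (text : String) (out : String) : Decidable (Spec_clean_repeat_suffix text out) := by unfold Spec_clean_repeat_suffix; infer_instance

-- ===== CLAIM (what is proved, stated in full; the proofs are below) =====
def Claim_equal_clean_repeat_suffix : Prop := ∀ (text : String), Dom_clean_repeat_suffix text → Spec_clean_repeat_suffix text (clean_repeat_suffix text)

-- ===== LEMMAS AND PROOFS =====

-- proof-side abbreviations: B's extension list, its maximum, and the capped maximum M
def pvEList (t : List Char) : List Nat := (List.range (t.length - 1)).map (fun j => pvExt t t.length j 0)
def pvMaxE (t : List Char) : Nat := (pvEList t).foldl max 0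
def pvCapM (t : List Char) : Nat := min (pvMaxE t) (t.length / 2)

lemma pvExt_le (t : List Char) (n j k : Nat) (h : k ≤ j + 1) : pvExt t n j k ≤ j + 1 := by
  fun_induction pvExt with
  | case1 k hcond ih => exact ih (by omega)
  | case2 k hcond => exact h

lemma pvExt_match (t : List Char) (n j k : Nat) :
    ∀ i, k ≤ i → i < pvExt t n j k → t.getD (j - i) ' ' = t.getD (n - 1 - i) ' ' := by
  fun_induction pvExt with
  | case1 k hcond ih =>
      intro i hki hi
      rcases Nat.eq_or_lt_of_le hki with h | h
      · subst h; exact hcond.2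
      · exact ih i h hi
  | case2 k hcond =>
      intro i hki hi; omega

lemma pvExt_stop (t : List Char) (n j k : Nat) (h : pvExt t n j k ≤ j) :
    t.getD (j - pvExt t n j k) ' ' ≠ t.getD (n - 1 - pvExt t n j k) ' ' := by
  fun_induction pvExt with
  | case1 k hcond ih => exact ih h
  | case2 k hcond =>
      intro heq
      exact hcond ⟨h, heq⟩

lemma le_ext_iff (t : List Char) (n j L : Nat) : L ≤ pvExt t n j 0 ↔
    L ≤ j + 1 ∧ ∀ i < L, t.getD (j - i) ' ' = t.getD (n - 1 - i) ' ' := by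
  constructor
  · intro h
    exact ⟨le_trans h (pvExt_le t n j 0 (by omega)),
      fun i hi => pvExt_match t n j 0 i (Nat.zero_le _) (lt_of_lt_of_le hi h)⟩
  · rintro ⟨hj, hm⟩
    by_contra hlt
    have hle : pvExt t n j 0 ≤ j := by omega
    exact pvExt_stop t n j 0 hle (hm _ (by omega))

lemma drop_getElem_getD (t : List Char) (a i : Nat) (h : i < (t.drop a).length) :
    (t.drop a)[i] = t.getD (a + i) ' ' := by
  rw [List.getElem_drop, List.getD_eq_getElem t ' ' (by simp at h; omega)]

-- the char-by-char backward matches are exactly 'the length-L suffix occurs ending at j'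
lemma chars_iff_prefix (t : List Char) (L j : Nat) (hL1 : 1 ≤ L) (hLn : L ≤ t.length)
    (hj : L ≤ j + 1) (hjn : j + 1 ≤ t.length) :
    (∀ i < L, t.getD (j - i) ' ' = t.getD (t.length - 1 - i) ' ') ↔
      t.drop (t.length - L) <+: t.drop (j + 1 - L) := by
  have hlen : (t.drop (t.length - L)).length = L := by
    rw [List.length_drop]; omega
  rw [List.prefix_iff_eq_take, hlen]
  constructor
  · intro h
    apply List.ext_getElem
    · rw [hlen, List.length_take, List.length_drop]; omega
    · intro i h1 h2
      have hi : i < L := by rw [hlen] at h1; omega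
      rw [List.getElem_take, drop_getElem_getD, drop_getElem_getD]
      have := h (L - 1 - i) (by omega)
      have e1 : t.length - L + i = t.length - 1 - (L - 1 - i) := by omega
      have e2 : j + 1 - L + i = j - (L - 1 - i) := by omega
      rw [e1, e2]
      exact this.symm
  · intro h i hi
    have hlen2 : L ≤ ((t.drop (j+1-L)).take L).length := by
      rw [List.length_take, List.length_drop]; omega
    have hgl : (t.drop (t.length - L))[L - 1 - i]'(by omega) =
        ((t.drop (j+1-L)).take L)[L - 1 - i]'(by omega) := List.getElem_of_eq h _
    rw [List.getElem_take, drop_getElem_getD, drop_getElem_getD] at hgl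
    have e1 : t.length - L + (L - 1 - i) = t.length - 1 - i := by omega
    have e2 : j + 1 - L + (L - 1 - i) = j - i := by omega
    rw [e1, e2] at hgl
    exact hgl.symm

lemma le_foldl_max_iff (l : List Nat) (a L : Nat) :
    L ≤ l.foldl max a ↔ L ≤ a ∨ ∃ x ∈ l, L ≤ x := by
  induction l generalizing a with
  | nil => simp
  | cons y ys ih =>
      simp only [List.foldl_cons, ih, List.mem_cons]
      constructor
      · rintro (h | ⟨x, hx, hLx⟩)
        · rcases Nat.lt_or_ge a L with h' | h'
          · exact Or.inr ⟨y, Or.inl rfl, by omega⟩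
          · exact Or.inl h'
        · exact Or.inr ⟨x, Or.inr hx, hLx⟩
      · rintro (h | ⟨x, hx | hx, hLx⟩)
        · exact Or.inl (by omega)
        · subst hx; exact Or.inl (by omega)
        · exact Or.inr ⟨x, hx, hLx⟩

lemma le_maxE_iff (t : List Char) (L : Nat) (hL : 1 ≤ L) :
    L ≤ pvMaxE t ↔ ∃ j < t.length - 1, L ≤ pvExt t t.length j 0 := by
  unfold pvMaxE pvEList
  rw [le_foldl_max_iff]
  simp [List.mem_range]
  omega

lemma find_nonneg (t : List Char) (L : Nat) :
    0 ≤ PySem.Chars.find t (t.drop (t.length - L)) := by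
  rw [PySem.Chars.find_nonneg_iff]
  exact (List.drop_suffix _ _).isInfix

lemma find_toNat_le (t : List Char) (L : Nat) :
    (PySem.Chars.find t (t.drop (t.length - L))).toNat ≤ t.length - L := by
  by_contra h
  have h0 := find_nonneg t L
  have hs := (PySem.Chars.find_spec h0).2 (t.length - L) (by omega)
  exact hs (List.prefix_refl _)

-- occurrence-existence form of A's loop condition
lemma cond_iff_exists (t : List Char) (k : Nat) (hk : k ≤ t.length) :
    (PySem.Chars.find t (t.drop (t.length - k)) + (k : Int) ≠ (t.length : Int)) ↔
      ∃ p, p + k < t.length ∧ t.drop (t.length - k) <+: t.drop p := by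
  have h0 := find_nonneg t k
  have hle := find_toNat_le t k
  have hF : PySem.Chars.find t (t.drop (t.length - k)) =
      ((PySem.Chars.find t (t.drop (t.length - k))).toNat : Int) := by omega
  rw [hF]
  constructor
  · intro hne
    refine ⟨(PySem.Chars.find t (t.drop (t.length - k))).toNat, by omega, ?_⟩
    exact (PySem.Chars.find_spec h0).1
  · rintro ⟨p, hp, hpre⟩
    have : (PySem.Chars.find t (t.drop (t.length - k))).toNat ≤ p := by
      by_contra hc
      exact (PySem.Chars.find_spec h0).2 p (by omega) hpre
    omega

-- an earlier occurrence of the length-k suffix exists iff some backward extension reaches k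
lemma exists_occ_iff (t : List Char) (k : Nat) (hk1 : 1 ≤ k) (hk : k ≤ t.length) :
    (∃ p, p + k < t.length ∧ t.drop (t.length - k) <+: t.drop p) ↔
      ∃ j < t.length - 1, k ≤ pvExt t t.length j 0 := by
  constructor
  · rintro ⟨p, hp, hpre⟩
    refine ⟨p + k - 1, by omega, ?_⟩
    rw [le_ext_iff]
    refine ⟨by omega, ?_⟩
    rw [chars_iff_prefix t k (p + k - 1) hk1 hk (by omega) (by omega)]
    have : p + k - 1 + 1 - k = p := by omega
    rw [this]
    exact hpre
  · rintro ⟨j, hj, hext⟩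
    have hj1 : k ≤ j + 1 := ((le_ext_iff t t.length j k).1 hext).1
    refine ⟨j + 1 - k, by omega, ?_⟩
    rw [← chars_iff_prefix t k j hk1 hk hj1 (by omega)]
    exact ((le_ext_iff t t.length j k).1 hext).2

-- A's loop condition at length k (11 ≤ k ≤ n/2) holds exactly when k ≤ pvMaxE t
lemma cond_iff (t : List Char) (k : Nat) (hk : 11 ≤ k) (hk2 : k ≤ t.length / 2) :
    (PySem.Chars.find t (t.drop (t.length - k)) + (k : Int) ≠ (t.length : Int)) ↔ k ≤ pvMaxE t := by
  rw [cond_iff_exists t k (by omega), exists_occ_iff t k (by omega) (by omega),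
     le_maxE_iff t k (by omega)]

-- when the loop fires at length M = pvCapM t, A's cut index equals B's
lemma fire_index (t : List Char) (hM : 11 ≤ pvCapM t) :
    (PySem.Chars.find t (t.drop (t.length - pvCapM t))).toNat + pvCapM t =
      (pvEList t).findIdx (fun x => decide (pvCapM t ≤ x)) + 1 := by
  set M := pvCapM t with hMdef
  have hMn : M ≤ t.length / 2 := Nat.min_le_right _ _
  have hMmax : M ≤ pvMaxE t := Nat.min_le_left _ _
  have hMt : M ≤ t.length := by omega
  set j0 := (pvEList t).findIdx (fun x => decide (M ≤ x)) with hj0def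
  have hlen : (pvEList t).length = t.length - 1 := by simp [pvEList]
  have hex : ∃ x ∈ pvEList t, (fun x => decide (M ≤ x)) x = true := by
    rcases (le_maxE_iff t M (by omega)).1 hMmax with ⟨j, hj, hje⟩
    refine ⟨pvExt t t.length j 0, ?_, by simpa using hje⟩
    simp [pvEList, List.mem_map]
    exact ⟨j, hj, rfl⟩
  have hj0lt : j0 < t.length - 1 := by
    rw [hj0def, ← hlen]; exact List.findIdx_lt_length_of_exists hex
  have hj0val : M ≤ pvExt t t.length j0 0 := by
    have h1 : j0 < (pvEList t).length := by omega
    have hpt := List.findIdx_getElem (w := h1)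
    have hval : (pvEList t)[j0]'h1 = pvExt t t.length j0 0 := by
      simp [pvEList]
    simp only [← hj0def] at hpt
    rw [hval] at hpt
    simpa using hpt
  have hF0 := find_nonneg t M
  have hFle := find_toNat_le t M
  set F := (PySem.Chars.find t (t.drop (t.length - M))).toNat with hFdef
  have hFpre : t.drop (t.length - M) <+: t.drop F := (PySem.Chars.find_spec hF0).1
  have h1 : F + M ≤ j0 + 1 := by
    have hj1 : M ≤ j0 + 1 := ((le_ext_iff t t.length j0 M).1 hj0val).1
    have hocc : t.drop (t.length - M) <+: t.drop (j0 + 1 - M) := by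
      rw [← chars_iff_prefix t M j0 (by omega) hMt hj1 (by omega)]
      exact ((le_ext_iff t t.length j0 M).1 hj0val).2
    have : F ≤ j0 + 1 - M := by
      by_contra hc
      exact (PySem.Chars.find_spec hF0).2 (j0 + 1 - M) (by omega) hocc
    omega
  have hcond : F < t.length - M := by
    rcases (exists_occ_iff t M (by omega) hMt).2 ((le_maxE_iff t M (by omega)).1 hMmax) with ⟨p, hp, hpre⟩
    have : F ≤ p := by
      by_contra hc
      exact (PySem.Chars.find_spec hF0).2 p (by omega) hpre
    omega
  have h2 : j0 + 1 ≤ F + M := by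
    have hje : M ≤ pvExt t t.length (F + M - 1) 0 := by
      rw [le_ext_iff]
      refine ⟨by omega, ?_⟩
      rw [chars_iff_prefix t M (F + M - 1) (by omega) hMt (by omega) (by omega)]
      have : F + M - 1 + 1 - M = F := by omega
      rw [this]; exact hFpre
    by_contra hc
    have hidx : F + M - 1 < (pvEList t).length := by omega
    have hlt : F + M - 1 < (pvEList t).findIdx (fun x => decide (M ≤ x)) := by omega
    have hfalse := List.not_of_lt_findIdx hlt
    simp [pvEList] at hfalse
    omega
  omega

lemma capM_eq (t : List Char) :
    pvCapM t = min ((((List.range (t.length - 1)).map (fun j => pvExt t t.length j 0)).foldl max 0)) (t.length / 2) := rfl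

lemma alt_of_small (text : String) (h : pvCapM text.toList ≤ 10) :
    clean_repeat_suffix_alt text = text := by
  rw [capM_eq] at h
  simp only [clean_repeat_suffix_alt]
  rw [if_pos h]

lemma alt_of_big (text : String) (h : 11 ≤ pvCapM text.toList) :
    clean_repeat_suffix_alt text =
      PySem.Str.slice text none
        (some (((pvEList text.toList).findIdx (fun x => decide (pvCapM text.toList ≤ x)) : Int) + 1)) := by
  have h' := h
  rw [capM_eq] at h'
  simp only [clean_repeat_suffix_alt]
  rw [if_neg (by omega)]
  rfl

lemma aLoop_cons (text : String) (n len : Int) (rest : List Int) :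
    pvALoop text n (len :: rest) =
      if PySem.Str.find text (PySem.Str.slice text (some (-len)) none) ≠ -1 ∧
          PySem.Str.find text (PySem.Str.slice text (some (-len)) none) + len ≠ n then
        PySem.Str.slice text none (some (PySem.Str.find text (PySem.Str.slice text (some (-len)) none) + len))
      else pvALoop text n rest := rfl

lemma find_slice_eq (text : String) (k : Nat) (hk : 0 < k) :
    PySem.Str.find text (PySem.Str.slice text (some (-(k : Int))) none) =
      PySem.Chars.find text.toList (text.toList.drop (text.toList.length - k)) := by
  rw [PySem.Str.find_eq]
  congr 1
  rw [PySem.Str.toList_slice, PySem.Chars.slice_eq_listSlice, PySem.List.slice_from_neg_natCast _ k hk]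

-- main loop invariant: once the remaining range starts at k with pvCapM ≤ k ≤ n/2, A's loop yields B's result
lemma aLoop_eq (text : String) (k : Nat) (hk : pvCapM text.toList ≤ k)
    (hk2 : k ≤ text.toList.length / 2) :
    pvALoop text (PySem.Str.len text) (PySem.List.pyRange (k : Int) 10 (-1)) =
      clean_repeat_suffix_alt text := by
  induction k with
  | zero =>
      rw [PySem.List.pyRange_neg_one_eq_nil (by omega)]
      exact (alt_of_small text (by omega)).symm
  | succ k ih =>
      by_cases hsmall : k + 1 ≤ 10
      · rw [PySem.List.pyRange_neg_one_eq_nil (by push_cast; omega)]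
        exact (alt_of_small text (by omega)).symm
      · rw [PySem.List.pyRange_neg_one_cons (by push_cast; omega : (10:Int) < ((k+1 : Nat) : Int)), aLoop_cons,
            find_slice_eq text (k+1) (by omega)]
        set t := text.toList with ht
        have hF0 := find_nonneg t (k+1)
        have hlen : PySem.Str.len text = (t.length : Int) := by
          simp [PySem.Str.len_eq, ht]
        by_cases hcondC : k + 1 ≤ pvMaxE t
        · have hM : pvCapM t = k + 1 := by
            have : k + 1 ≤ pvCapM t := le_min hcondC hk2
            omega
          have hcond2 := (cond_iff t (k+1) (by omega) hk2).2 hcondC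
          rw [hlen, if_pos ⟨by omega, hcond2⟩]
          rw [alt_of_big text (by rw [← ht, hM]; omega)]
          have hfi := fire_index t (by omega)
          rw [hM] at hfi
          have hint : PySem.Chars.find t (t.drop (t.length - (k+1))) + ((k+1 : Nat) : Int) =
              ((List.findIdx (fun x => decide (k + 1 ≤ x)) (pvEList t) : Nat) : Int) + 1 := by omega
          rw [← ht, hM, hint]
        · have hcond2 : ¬ (PySem.Chars.find t (t.drop (t.length - (k+1))) + ((k+1 : Nat) : Int) ≠ (t.length : Int)) := by
            intro hc
            exact hcondC ((cond_iff t (k+1) (by omega) hk2).1 (by exact_mod_cast hc))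
          rw [hlen, if_neg (by push_cast at hcond2 ⊢; tauto)]
          have : ((k+1 : Nat) : Int) - 1 = ((k : Nat) : Int) := by push_cast; ring
          rw [this]
          exact ih (by have : pvCapM t ≤ pvMaxE t := Nat.min_le_left _ _; omega) (by omega)

-- ===== VERDICT (by name: the statement is the Claim_ definition above) =====
theorem clean_repeat_suffix_spec : Claim_equal_clean_repeat_suffix := by
  intro text _
  unfold Spec_clean_repeat_suffix clean_repeat_suffix
  have h := aLoop_eq text (text.toList.length / 2) (Nat.min_le_right _ _) (le_refl _)
  simpa [PySem.Str.len, PySem.Chars.len_eq, PySem.Int.floordiv_natCast] using h
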